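-- pv_equiv track=rewrite | github.com/atakanozguryildiz/HackerRank | forming_a_magic_square.py | convert_tuple_to_matrix
-- ===== SOURCE A (Python) =====
-- def convert_tuple_to_matrix(t):
--     result = []
--     temp = []
--     for i in t:
--         temp.append(i)
--         if len(temp) == 3:
--             result.append(temp)
--             temp = []
--     return result
-- ===== SOURCE B (Python) =====
-- def convert_tuple_to_matrix(t):
--     return [list(t[i:i+3]) for i in range(0, len(t) // 3 * 3, 3)]
-- ===== Notes on version B (the rewrite author's own statement) =====
-- stated objective: idiomatic
-- what changed: Replaces the running temp-buffer accumulator (append, len==3 flush) with direct slicing: one comprehension over range(0, len(t)//3*3, 3) taking t[i:i+3] per row, the stop bound dropping a trailing incomplete group exactly as A does.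
import Mathlib
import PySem

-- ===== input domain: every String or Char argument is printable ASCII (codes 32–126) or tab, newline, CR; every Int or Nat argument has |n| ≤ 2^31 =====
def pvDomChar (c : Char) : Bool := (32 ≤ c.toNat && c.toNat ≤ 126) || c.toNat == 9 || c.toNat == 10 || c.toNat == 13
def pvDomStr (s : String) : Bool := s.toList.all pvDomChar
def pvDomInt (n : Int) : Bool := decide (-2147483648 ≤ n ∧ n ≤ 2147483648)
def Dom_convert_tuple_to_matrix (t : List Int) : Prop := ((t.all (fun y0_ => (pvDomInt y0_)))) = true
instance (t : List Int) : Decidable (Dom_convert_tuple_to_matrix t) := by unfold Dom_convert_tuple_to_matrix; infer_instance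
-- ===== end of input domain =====

-- B reshapes by slicing t[i:i+3] over a stride-3 range instead of A's running temp buffer;
-- objective: more idiomatic, same O(n) cost. Equal return value proved on all inputs.
-- B reshapes by slicing t[i:i+3] over a stride-3 range instead of A's running temp buffer;
-- objective: more idiomatic, same O(n) cost. Equal return value proved on all inputs.
-- ===== PORT A =====
-- loop body of A (temp.append(i); flush when len(temp)==3)
def stepA (st : List (List Int) × List Int) (i : Int) : List (List Int) × List Int :=
  let temp := st.2 ++ [i]
  if temp.length = 3 then (st.1 ++ [temp], ([] : List Int)) else (st.1, temp)

def convert_tuple_to_matrix (t : List Int) : List (List Int) :=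
  (t.foldl stepA (([] : List (List Int)), ([] : List Int))).1

-- ===== PORT B =====
def convert_tuple_to_matrix_alt (t : List Int) : List (List Int) :=
  (PySem.List.pyRange 0 (PySem.Int.floordiv (t.length : Int) 3 * 3) 3).map
    (fun i => PySem.List.slice t (some i) (some (i + 3)))

-- ===== PRECONDITION & SPEC =====
def Spec_convert_tuple_to_matrix (t : List Int) (out : List (List Int)) : Prop := out = convert_tuple_to_matrix_alt t
instance (t : List Int) (out : List (List Int)) : Decidable (Spec_convert_tuple_to_matrix t out) := by unfold Spec_convert_tuple_to_matrix; infer_instance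

-- ===== CLAIM (what is proved, stated in full; the proofs are below) =====
def Claim_equal_convert_tuple_to_matrix : Prop := ∀ (t : List Int), Dom_convert_tuple_to_matrix t → Spec_convert_tuple_to_matrix t (convert_tuple_to_matrix t)

-- ===== LEMMAS AND PROOFS =====

-- reference chunking: groups of three, trailing remainder dropped
def chunk3 : List Int → List (List Int)
  | x :: y :: z :: r => [x, y, z] :: chunk3 r
  | _ => []

theorem foldA_eq_chunk3 : ∀ (t : List Int) (res : List (List Int)),
    (t.foldl stepA (res, ([] : List Int))).1 = res ++ chunk3 t
  | x :: y :: z :: r, res => by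
      simp only [List.foldl_cons]
      have e1 : stepA (res, []) x = (res, [x]) := by simp [stepA]
      have e2 : stepA (res, [x]) y = (res, [x, y]) := by simp [stepA]
      have e3 : stepA (res, [x, y]) z = (res ++ [[x, y, z]], []) := by simp [stepA]
      rw [e1, e2, e3, foldA_eq_chunk3 r (res ++ [[x, y, z]])]
      simp [chunk3]
  | [], res => by simp [chunk3]
  | [x], res => by simp [List.foldl, stepA, chunk3]
  | [x, y], res => by simp [List.foldl, stepA, chunk3]

theorem sliceB_eq_chunk3 : ∀ (t : List Int),
    (List.range (t.length / 3)).map (fun j => (t.drop (3 * j)).take 3) = chunk3 t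
  | x :: y :: z :: r => by
      have hlen : (x :: y :: z :: r).length / 3 = r.length / 3 + 1 := by
        simp [List.length_cons]; omega
      rw [hlen, List.range_succ_eq_map, List.map_cons, List.map_map]
      simp only [chunk3]
      congr 1
      rw [← sliceB_eq_chunk3 r]
      apply List.map_congr_left
      intro j _
      simp only [Function.comp]
      have h3 : 3 * (j + 1) = (3 * j) + 3 := by ring
      rw [h3]
      have hdd : List.drop (3 * j + 3) (x :: y :: z :: r) = List.drop (3 * j) r := by
        rw [Nat.add_comm, ← List.drop_drop]; rfl
      rw [hdd]
  | [] => by simp [chunk3]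
  | [x] => by simp [chunk3]
  | [x, y] => by simp [chunk3]

theorem altB_eq_chunk3 (t : List Int) : convert_tuple_to_matrix_alt t = chunk3 t := by
  unfold convert_tuple_to_matrix_alt
  have hfd : PySem.Int.floordiv (t.length : Int) 3 * 3 = ((3 * (t.length / 3) : Nat) : Int) := by
    simp [PySem.Int.floordiv, Int.fdiv_eq_ediv]
    omega
  rw [hfd, PySem.List.pyRange_of_pos 0 _ (by norm_num : (0:Int) < 3)]
  set k := t.length / 3 with hk
  have hcnt : (if (0:Int) < ((3 * k : Nat) : Int) then ((((3 * k : Nat) : Int) - 0 + 3 - 1) / 3).toNat else 0) = k := by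
    split_ifs with h
    · omega
    · omega
  rw [hcnt, List.map_map, ← sliceB_eq_chunk3 t, hk]
  apply List.map_congr_left
  intro j _
  simp only [Function.comp, zero_add]
  have h1 : (3 * (j:Int)) = ((3 * j : Nat) : Int) := by push_cast; ring
  rw [h1]
  have h2 : ((3 * j : Nat) : Int) + 3 = ((3 * j : Nat) : Int) + ((3:Nat) : Int) := by norm_num
  rw [h2, PySem.List.slice_natCast_add]

-- ===== VERDICT (by name: the statement is the Claim_ definition above) =====
theorem convert_tuple_to_matrix_spec : Claim_equal_convert_tuple_to_matrix := by
  intro t _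
  unfold Spec_convert_tuple_to_matrix convert_tuple_to_matrix
  rw [altB_eq_chunk3, foldA_eq_chunk3 t []]
  simp
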